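-- pv_equiv track=rewrite | github.com/itaykbn/cyber-senior-project | locallibrary/home/views.py | create_post_list
-- ===== SOURCE A (Python) =====
-- post_chunk = 20
--
-- def create_post_list(index, posts, post_type):
--     new_posts = [None] * 20
--
--     n_objects = len(posts)
--
--     for i in range(post_chunk):
--         if index + i >= n_objects:
--             if post_type == "home":
--                 overlapped_index = (index + i) % n_objects
--                 new_posts[i] = posts[overlapped_index]
--         else:
--             new_posts[i] = posts[index + i]
--
--     return new_posts
-- ===== SOURCE B (Python) =====
-- post_chunk = 20
--
-- def create_post_list(index, posts, post_type):
--     if post_type == "home":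
--         n_objects = len(posts)
--         return [posts[(index + i) % n_objects] for i in range(post_chunk)]
--     window = posts[index:index + post_chunk]
--     return window + [None] * (post_chunk - len(window))
-- ===== Notes on version B (the rewrite author's own statement) =====
-- stated objective: simpler
-- what changed: Branches on post_type first: the home case becomes a single modular-index comprehension and the other case a single slice plus None-padding, replacing A's unified per-slot bounds-checking loop over a preallocated 20-slot list.
import Mathlib
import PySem

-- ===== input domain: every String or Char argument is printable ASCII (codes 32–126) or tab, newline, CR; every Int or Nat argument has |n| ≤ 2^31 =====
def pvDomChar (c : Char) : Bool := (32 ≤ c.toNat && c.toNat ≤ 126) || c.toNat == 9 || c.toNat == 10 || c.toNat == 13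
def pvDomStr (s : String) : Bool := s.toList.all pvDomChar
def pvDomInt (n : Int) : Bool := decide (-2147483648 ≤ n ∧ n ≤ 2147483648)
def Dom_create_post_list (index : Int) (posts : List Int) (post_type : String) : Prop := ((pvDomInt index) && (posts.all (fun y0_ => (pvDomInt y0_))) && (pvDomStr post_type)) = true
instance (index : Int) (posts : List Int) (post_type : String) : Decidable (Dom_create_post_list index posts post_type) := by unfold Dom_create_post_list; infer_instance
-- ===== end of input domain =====

-- B branches on post_type first: the "home" case is one modular-index pass and the other case
-- one slice plus None-padding, replacing A's per-slot bounds-checking loop (objective: simpler).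

-- ===== PORT A =====
def create_post_list (index : Int) (posts : List Int) (post_type : String) : List (Option Int) :=
  let new_posts : List (Option Int) := List.replicate 20 none
  let n_objects : Int := (posts.length : Int)
  (PySem.List.pyRange 0 20 1).foldl (fun new_posts i =>
    if index + i ≥ n_objects then
      if post_type == "home" then
        let overlapped_index := PySem.Int.mod (index + i) n_objects
        PySem.List.pySetD new_posts i (PySem.List.pyGet? posts overlapped_index)
      else
        new_posts
    else
      PySem.List.pySetD new_posts i (PySem.List.pyGet? posts (index + i))) new_posts

-- ===== PORT B =====
def create_post_list_alt (index : Int) (posts : List Int) (post_type : String) : List (Option Int) :=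
  if post_type == "home" then
    let n_objects : Int := (posts.length : Int)
    (PySem.List.pyRange 0 20 1).map (fun i => PySem.List.pyGet? posts (PySem.Int.mod (index + i) n_objects))
  else
    let window := PySem.List.slice posts (some index) (some (index + 20))
    window.map some ++ List.replicate (20 - window.length) none

-- ===== PRECONDITION & SPEC =====
-- Pre_ restricts to the natural domain of a pagination offset (index ≥ 0: on a negative index
-- A reads slots via Python's negative-index wraparound, outside the function's purpose, and can
-- raise IndexError below -len(posts)) and excludes "home" with empty posts, where A raises
-- ZeroDivisionError.
def Pre_create_post_list (index : Int) (posts : List Int) (post_type : String) : Prop :=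
  0 ≤ index ∧ (post_type = "home" → posts ≠ [])
instance (index : Int) (posts : List Int) (post_type : String) : Decidable (Pre_create_post_list index posts post_type) := by unfold Pre_create_post_list; infer_instance

def pvWitness_create_post_list : Int × List Int × String := (1, [10, 20, 30], "home")

def Spec_create_post_list (index : Int) (posts : List Int) (post_type : String) (out : List (Option Int)) : Prop := out = create_post_list_alt index posts post_type
instance (index : Int) (posts : List Int) (post_type : String) (out : List (Option Int)) : Decidable (Spec_create_post_list index posts post_type out) := by unfold Spec_create_post_list; infer_instance

-- ===== CLAIM (what is proved, stated in full; the proofs are below) =====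
def Claim_equal_create_post_list : Prop := ∀ (index : Int) (posts : List Int) (post_type : String), Dom_create_post_list index posts post_type → Pre_create_post_list index posts post_type → Spec_create_post_list index posts post_type (create_post_list index posts post_type)

-- ===== LEMMAS AND PROOFS =====
set_option maxRecDepth 10000 in
set_option maxHeartbeats 4000000 in
theorem pv_fold_set_eq_map (g : Int → Option Int) :
    (PySem.List.pyRange 0 20 1).foldl (fun a i => PySem.List.pySetD a i (g i)) (List.replicate 20 none)
      = (PySem.List.pyRange 0 20 1).map g := by
  rw [show PySem.List.pyRange 0 20 1 = [0,1,2,3,4,5,6,7,8,9,10,11,12,13,14,15,16,17,18,19] from by decide]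
  norm_num [PySem.List.pySetD, PySem.List.pySet?, PySem.List.pyIdx?, List.replicate, List.set]
  rfl

theorem pv_foldA_char (index : Int) (posts : List Int) :
    ∀ (k : Nat), k ≤ 20 → ∀ (acc : List (Option Int)), acc.length = 20 → ∀ (j : Nat), j < 20 →
      ((PySem.List.pyRange ((20 - k : Nat) : Int) 20 1).foldl
        (fun a i => if index + i ≥ (posts.length : Int) then a
                    else PySem.List.pySetD a i (PySem.List.pyGet? posts (index + i))) acc)[j]? =
      (if 20 - k ≤ j ∧ index + (j : Int) < (posts.length : Int) then some (PySem.List.pyGet? posts (index + (j : Int)))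
       else acc[j]?) := by
  intro k
  induction k with
  | zero =>
    intro _ acc hacc j hj
    rw [PySem.List.pyRange_one_eq_nil (by norm_num)]
    simp only [List.foldl_nil]
    rw [if_neg (by omega)]
  | succ k ih =>
    intro hk acc hacc j hj
    have hs : ((20 - (k+1) : Nat) : Int) < 20 := by omega
    rw [PySem.List.pyRange_one_cons hs]
    simp only [List.foldl_cons]
    have hsucc : ((20 - (k+1) : Nat) : Int) + 1 = ((20 - k : Nat) : Int) := by omega
    rw [hsucc]
    by_cases hc : index + ((20 - (k+1) : Nat) : Int) ≥ (posts.length : Int)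
    · rw [if_pos hc, ih (by omega) acc hacc j hj]
      by_cases h1 : 20 - k ≤ j ∧ index + (j : Int) < (posts.length : Int)
      · rw [if_pos h1, if_pos ⟨by omega, h1.2⟩]
      · rw [if_neg h1]
        by_cases h2 : 20 - (k+1) ≤ j ∧ index + (j : Int) < (posts.length : Int)
        · exfalso
          have hj20 : j = 20 - (k+1) := by omega
          have : index + (j : Int) ≥ (posts.length : Int) := by rw [hj20]; exact hc
          omega
        · rw [if_neg h2]
    · rw [if_neg hc,
        ih (by omega) _ (by rw [PySem.List.length_pySetD]; exact hacc) j hj,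
        PySem.List.pySetD_of_nonneg _ _ (by omega)]
      by_cases h1 : 20 - k ≤ j ∧ index + (j : Int) < (posts.length : Int)
      · rw [if_pos h1, if_pos ⟨by omega, h1.2⟩]
      · rw [if_neg h1]
        simp only [Int.toNat_natCast]
        rw [List.getElem?_set]
        by_cases he : 20 - (k+1) = j
        · rw [if_pos he]
          have hcj : index + (j : Int) < (posts.length : Int) := by
            rw [← he]; omega
          rw [if_pos (show 20 - (k + 1) < acc.length by omega), if_pos ⟨by omega, hcj⟩, ← he]
        · rw [if_neg he, if_neg (by omega)]

theorem pv_fold_len (index : Int) (posts : List Int) :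
    ∀ (l : List Int) (acc : List (Option Int)),
      (l.foldl (fun a i => if index + i ≥ (posts.length : Int) then a
          else PySem.List.pySetD a i (PySem.List.pyGet? posts (index + i))) acc).length = acc.length := by
  intro l
  induction l with
  | nil => intro acc; rfl
  | cons x xs ih =>
    intro acc
    rw [List.foldl_cons, ih]
    split <;> simp [PySem.List.length_pySetD]

theorem pv_main (index : Int) (posts : List Int) (post_type : String)
    (hix : 0 ≤ index) (hne : post_type = "home" → posts ≠ []) :
    create_post_list index posts post_type = create_post_list_alt index posts post_type := by
  unfold create_post_list create_post_list_alt
  by_cases hb : post_type == "home"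
  · -- home case
    have hnil : posts ≠ [] := hne (by simpa using hb)
    have hn : 0 < (posts.length : Int) := by
      have := List.length_pos_iff.mpr hnil; omega
    simp only [hb, if_true]
    rw [PySem.List.foldl_congr_mem _ _
      (fun a i => PySem.List.pySetD a i (PySem.List.pyGet? posts (PySem.Int.mod (index + i) (posts.length : Int)))) _
      (by
        intro acc i hi
        rcases PySem.List.mem_pyRange_one.mp hi with ⟨hi0, _⟩
        beta_reduce
        by_cases hc : index + i ≥ (posts.length : Int)
        · rw [if_pos hc]
        · rw [if_neg hc]
          have hm : PySem.Int.mod (index + i) (posts.length : Int) = index + i := by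
            rw [PySem.Int.mod_eq_emod_of_pos hn, Int.emod_eq_of_lt (by omega) (by omega)]
          rw [hm])]
    exact pv_fold_set_eq_map _
  · -- non-home case
    have hb' : (post_type == "home") = false := by simpa using hb
    simp only [hb', Bool.false_eq_true, if_false]
    rw [PySem.List.slice_toNat posts hix (by omega)]
    have htn : (index + 20).toNat - index.toNat = 20 := by omega
    rw [htn]
    set it := index.toNat with hit
    set w := List.take 20 (List.drop it posts) with hw
    have hwl : w.length = min 20 (posts.length - it) := by simp [hw]
    have hwle : w.length ≤ 20 := by omega
    apply List.ext_getElem?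
    intro j
    by_cases hj : j < 20
    · have hA := pv_foldA_char index posts 20 (le_refl 20) (List.replicate 20 none) (by simp) j hj
      norm_num at hA
      rw [hA]
      by_cases hjw : j < w.length
      · have hlt : it + j < posts.length := by omega
        have hcond : index + (j : Int) < (posts.length : Int) := by omega
        rw [if_pos hcond]
        rw [List.getElem?_append_left (by simpa using hjw)]
        rw [List.getElem?_map]
        rw [hw, List.getElem?_take_of_lt hj, List.getElem?_drop]
        rw [List.getElem?_eq_getElem hlt]
        rw [PySem.List.pyGet?_of_nonneg _ (by omega)]
        have h2 : (index + (j : Int)).toNat = it + j := by omega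
        rw [h2, List.getElem?_eq_getElem hlt]
        simp
      · have hge : ¬ (index + (j : Int) < (posts.length : Int)) := by omega
        rw [if_neg hge]
        rw [List.getElem?_append_right (by simpa using hjw)]
        simp only [List.length_map]
        rw [List.getElem?_replicate, if_pos (by omega)]
        rw [List.getElem?_replicate, if_pos (by omega)]
    · rw [List.getElem?_eq_none (by rw [pv_fold_len]; simp; omega)]
      rw [List.getElem?_eq_none (by
        simp only [List.length_append, List.length_map, List.length_replicate]
        omega)]

-- ===== VERDICT (by name: the statement is the Claim_ definition above) =====
theorem create_post_list_spec : Claim_equal_create_post_list := by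
  intro index posts post_type _ hpre
  unfold Spec_create_post_list
  exact pv_main index posts post_type hpre.1 hpre.2
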